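-- pv_equiv track=rewrite | github.com/alonsobern/Python | DoctorsInterface.py | removeMedication
-- ===== SOURCE A (Python) =====
-- def removeMedication(patient, medication):
--     tempNewMedication = list()
--     if medication in patient['medications']:
--         for value in patient['medications']:
--             tempNewMedication.append(value)
--         tempNewMedication.remove(medication)
--         patient.update({'medications':tempNewMedication})
--         return "\nThe medication was removed from their records."
--     else:
--         return "The medication was not found! Please check the records."
-- ===== SOURCE B (Python) =====
-- def removeMedication(patient, medication):
--     def drop_first(xs):
--         # one recursive pass: None = not found, else the list without the first occurrence
--         if not xs:
--             return None
--         if xs[0] == medication: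
--             return xs[1:]
--         rest = drop_first(xs[1:])
--         return None if rest is None else [xs[0]] + rest
--     new = drop_first(patient['medications'])
--     if new is None:
--         return "The medication was not found! Please check the records."
--     patient['medications'] = new
--     return "\nThe medication was removed from their records."
-- ===== Notes on version B (the rewrite author's own statement) =====
-- stated objective: alternative
-- what changed: B makes no membership test and no copy+remove: a single recursive pass over the list returns None (not found) or the list with its first occurrence removed, and the message is chosen from that one Optional result; return strings unchanged.
import Mathlib
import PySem

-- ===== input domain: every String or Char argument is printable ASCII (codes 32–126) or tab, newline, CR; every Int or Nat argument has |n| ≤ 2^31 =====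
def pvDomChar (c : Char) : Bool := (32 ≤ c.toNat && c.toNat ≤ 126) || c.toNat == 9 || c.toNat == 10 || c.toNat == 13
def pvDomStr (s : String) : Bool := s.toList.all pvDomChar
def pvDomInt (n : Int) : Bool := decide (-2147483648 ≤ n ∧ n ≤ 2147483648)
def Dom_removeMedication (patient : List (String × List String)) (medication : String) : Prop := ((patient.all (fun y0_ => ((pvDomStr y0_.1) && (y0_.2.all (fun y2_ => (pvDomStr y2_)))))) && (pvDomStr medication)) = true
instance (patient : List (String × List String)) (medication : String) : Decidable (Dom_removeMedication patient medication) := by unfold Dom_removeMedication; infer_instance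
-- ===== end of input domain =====

-- B change: no membership test and no copy+remove — one recursive pass returns Option (list
-- without the first occurrence), and the message is chosen from that single result; the list
-- mutation is a side effect, the equivalence proved is about the return value.

-- ===== PORT A =====
def removeMedication (patient : List (String × List String)) (medication : String) : String :=
  match List.lookup "medications" patient with
  | none => ""  -- patient['medications'] raises KeyError; excluded by Pre_
  | some meds =>
    if meds.contains medication then
      -- copy loop into tempNewMedication, then .remove(medication); dead for the return value
      let tempNewMedication := meds.foldl (fun acc value => acc ++ [value]) []
      let _ := PySem.List.remove? tempNewMedication medication
      "\nThe medication was removed from their records."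
    else
      "The medication was not found! Please check the records."

-- ===== PORT B =====
-- drop_first: one recursive pass; none = not found, some = list without the first occurrence
def dropFirstB (medication : String) : List String → Option (List String)
  | [] => none
  | x :: xs =>
    if x = medication then some xs
    else match dropFirstB medication xs with
      | none => none
      | some rest => some (x :: rest)

def removeMedication_alt (patient : List (String × List String)) (medication : String) : String :=
  match List.lookup "medications" patient with
  | none => ""  -- KeyError; excluded by Pre_
  | some meds =>
    match dropFirstB medication meds with
    | none => "The medication was not found! Please check the records."
    | some _ => "\nThe medication was removed from their records."

-- ===== PRECONDITION & SPEC =====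
-- Pre_ excludes exactly the patients without a 'medications' key, on which Python A raises KeyError.
def Pre_removeMedication (patient : List (String × List String)) (medication : String) : Prop :=
  (List.lookup "medications" patient).isSome
instance (patient : List (String × List String)) (medication : String) : Decidable (Pre_removeMedication patient medication) := by unfold Pre_removeMedication; infer_instance
def pvWitness_removeMedication : (List (String × List String)) × String := ([("medications", ["aspirin"])], "aspirin")
def Spec_removeMedication (patient : List (String × List String)) (medication : String) (out : String) : Prop := out = removeMedication_alt patient medication
instance (patient : List (String × List String)) (medication : String) (out : String) : Decidable (Spec_removeMedication patient medication out) := by unfold Spec_removeMedication; infer_instance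

-- ===== CLAIM (what is proved, stated in full; the proofs are below) =====
def Claim_equal_removeMedication : Prop := ∀ (patient : List (String × List String)) (medication : String), Dom_removeMedication patient medication → Pre_removeMedication patient medication → Spec_removeMedication patient medication (removeMedication patient medication)

-- ===== LEMMAS AND PROOFS =====
theorem dropFirstB_isSome (medication : String) (xs : List String) :
    (dropFirstB medication xs).isSome = xs.contains medication := by
  induction xs with
  | nil => rfl
  | cons x xs ih =>
    by_cases hx : x = medication
    · simp [dropFirstB, hx]
    · simp only [dropFirstB, if_neg hx]
      cases h : dropFirstB medication xs with
      | none => simp [h] at ih ⊢; simp [ih, Ne.symm hx]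
      | some rest => simp [h] at ih ⊢; exact Or.inr ih

-- ===== VERDICT (by name: the statement is the Claim_ definition above) =====
theorem removeMedication_spec : Claim_equal_removeMedication := by
  intro patient medication _ _
  unfold Spec_removeMedication removeMedication removeMedication_alt
  cases h : List.lookup "medications" patient with
  | none => rfl
  | some meds =>
    have hs := dropFirstB_isSome medication meds
    cases hd : dropFirstB medication meds with
    | none => simp [hd] at hs; simp [hd, hs]
    | some rest => simp [hd] at hs; simp [hd, hs]
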